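-- pv_equiv track=rewrite | github.com/kodreanuja/python | increaseKeyInHeap1.py | increaseKey
-- ===== SOURCE A (Python) =====
-- def increaseKey(arr, i, key):
--     if key < arr[i]:
--         return "Wrong operation"
--     arr[i] = key
--     while (i > 0 and arr[i//2] < arr[i]):
--         arr[i], arr[i//2] = arr[i//2], arr[i]
--         i = i//2
--     return arr
-- ===== SOURCE B (Python) =====
-- def increaseKey(arr, i, key):
--     if key < arr[i]:
--         return "Wrong operation"
--     # pass 1 (read-only): record, as a sparse override map, the parents that key displaces
--     chain = {}
--     j = i
--     while j > 0 and arr[j // 2] < key: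
--         chain[j] = arr[j // 2]
--         j //= 2
--     # pass 2: rebuild the whole list in one sweep, applying the overrides, then drop key in its slot
--     arr[:] = [chain.get(t, v) for t, v in enumerate(arr)]
--     arr[j] = key
--     return arr
-- ===== Notes on version B (the rewrite author's own statement) =====
-- stated objective: alternative
-- what changed: Instead of swapping pairs up the heap in place, B first walks the ancestor chain read-only building a sparse override dict (index -> displaced parent value), then rebuilds the whole list in one comprehension pass applying the overrides and finally writes the key at its resting slot.
-- outside the precondition, e.g. on increaseKey([5, 3], 1, 2): A returns 'Wrong operation', B returns 'Wrong operation'; on increaseKey([1, 2], 5, 9): A raises IndexError, B raises IndexError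
import Mathlib
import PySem

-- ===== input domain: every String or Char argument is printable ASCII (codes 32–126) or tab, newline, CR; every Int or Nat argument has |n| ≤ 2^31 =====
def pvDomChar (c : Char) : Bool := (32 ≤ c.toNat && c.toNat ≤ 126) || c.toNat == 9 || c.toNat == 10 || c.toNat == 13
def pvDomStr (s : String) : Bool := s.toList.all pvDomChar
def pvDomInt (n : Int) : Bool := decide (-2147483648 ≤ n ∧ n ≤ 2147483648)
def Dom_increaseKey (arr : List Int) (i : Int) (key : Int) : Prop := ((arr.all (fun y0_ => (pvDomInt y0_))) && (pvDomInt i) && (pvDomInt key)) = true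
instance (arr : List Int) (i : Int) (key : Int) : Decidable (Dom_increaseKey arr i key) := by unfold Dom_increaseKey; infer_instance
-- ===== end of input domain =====

-- B replaces the in-place swap sift-up by: a read-only walk building a sparse override dict, then a one-sweep rebuild of the list, then one key write.
-- Both Pythons mutate arr in place; the equivalence proved here is about the return value.


-- ===== PORT A =====
-- the while loop of A: swap arr[i] with arr[i//2] while the parent is smaller
def swapLoop (arr : List Int) (i : Int) : List Int :=
  if h : 0 < i ∧ PySem.List.pyGetD arr (PySem.Int.floordiv i 2) 0 < PySem.List.pyGetD arr i 0 then
    swapLoop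
      (PySem.List.pySetD
        (PySem.List.pySetD arr i (PySem.List.pyGetD arr (PySem.Int.floordiv i 2) 0))
        (PySem.Int.floordiv i 2) (PySem.List.pyGetD arr i 0))
      (PySem.Int.floordiv i 2)
  else arr
termination_by i.toNat
decreasing_by
  obtain ⟨h1, -⟩ := h
  rw [PySem.Int.floordiv_eq_ediv_of_pos (by omega : (0:Int) < 2)]; omega

-- pyGetD/pySetD are the total forms of arr[i] / arr[i]=v, exact under Pre_ (index in range)
def increaseKey (arr : List Int) (i : Int) (key : Int) : List Int :=
  if key < PySem.List.pyGetD arr i 0 then []  -- Python returns the STRING "Wrong operation" here (outside List Int); excluded by Pre_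
  else swapLoop (PySem.List.pySetD arr i key) i

-- ===== PORT B =====
-- B's pass 1: the while loop recording the displaced parents in the dict
def chainLoop (arr : List Int) (j : Int) (key : Int) (d : PySem.Dict Int Int) : PySem.Dict Int Int × Int :=
  if h : 0 < j ∧ PySem.List.pyGetD arr (PySem.Int.floordiv j 2) 0 < key then
    chainLoop arr (PySem.Int.floordiv j 2) key
      (d.insert j (PySem.List.pyGetD arr (PySem.Int.floordiv j 2) 0))
  else (d, j)
termination_by j.toNat
decreasing_by
  obtain ⟨h1, -⟩ := h
  rw [PySem.Int.floordiv_eq_ediv_of_pos (by omega : (0:Int) < 2)]; omega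

-- B's pass 2: the comprehension '[chain.get(t, v) for t, v in enumerate(arr)]'
def rebuild (chain : PySem.Dict Int Int) (arr : List Int) : List Int :=
  (PySem.List.enumerate arr).map (fun tv => (chain.get? tv.1).getD tv.2)

def increaseKey_alt (arr : List Int) (i : Int) (key : Int) : List Int :=
  if key < PySem.List.pyGetD arr i 0 then []  -- same guard as A; excluded by Pre_
  else
    let cj := chainLoop arr i key PySem.Dict.empty
    PySem.List.pySetD (rebuild cj.1 arr) cj.2 key

-- ===== PRECONDITION & SPEC =====
-- Pre_ excludes (a) out-of-range i, where A raises IndexError, and (b) key < arr[i],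
-- where A returns the string "Wrong operation", which is not a value of the declared List Int type.
def Pre_increaseKey (arr : List Int) (i : Int) (key : Int) : Prop :=
  PySem.Raise.InRange arr.length i ∧ PySem.List.pyGetD arr i 0 ≤ key
instance (arr : List Int) (i : Int) (key : Int) : Decidable (Pre_increaseKey arr i key) := by unfold Pre_increaseKey; infer_instance
def pvWitness_increaseKey : List Int × Int × Int := ([3, 1], 1, 5)

def Spec_increaseKey (arr : List Int) (i : Int) (key : Int) (out : List Int) : Prop := out = increaseKey_alt arr i key
instance (arr : List Int) (i : Int) (key : Int) (out : List Int) : Decidable (Spec_increaseKey arr i key out) := by unfold Spec_increaseKey; infer_instance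

-- ===== CLAIM (what is proved, stated in full; the proofs are below) =====
def Claim_equal_increaseKey : Prop := ∀ (arr : List Int) (i : Int) (key : Int), Dom_increaseKey arr i key → Pre_increaseKey arr i key → Spec_increaseKey arr i key (increaseKey arr i key)

-- ===== LEMMAS AND PROOFS =====

-- pure reference form of the sift: read parents from the ORIGINAL arr, set going up
def sift (arr : List Int) (m : Nat) (key : Int) : List Int :=
  if 0 < m ∧ arr.getD (m / 2) 0 < key then
    (sift arr (m / 2) key).set m (arr.getD (m / 2) 0)
  else arr.set m key
termination_by m
decreasing_by omega

lemma swapLoop_of_nonpos (arr : List Int) (i : Int) (h : ¬ 0 < i) : swapLoop arr i = arr := by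
  rw [swapLoop]; simp [h]

lemma chainLoop_of_nonpos (arr : List Int) (j : Int) (key : Int) (d : PySem.Dict Int Int)
    (h : ¬ 0 < j) : chainLoop arr j key d = (d, j) := by
  rw [chainLoop]; simp [h]

lemma length_sift (key : Int) :
    ∀ m : Nat, ∀ arr : List Int, (sift arr m key).length = arr.length := by
  intro m
  induction m using Nat.strong_induction_on with
  | _ m ih =>
    intro arr
    rw [sift]
    by_cases hc : 0 < m ∧ arr.getD (m / 2) 0 < key
    · rw [if_pos hc, List.length_set, ih (m / 2) (Nat.div_lt_self hc.1 (by omega))]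
    · rw [if_neg hc, List.length_set]

lemma sift_set_high (key : Int) :
    ∀ j : Nat, ∀ (arr : List Int) (n : Nat) (v : Int), j < n →
      sift (arr.set n v) j key = (sift arr j key).set n v := by
  intro j
  induction j using Nat.strong_induction_on with
  | _ j ih =>
    intro arr n v hjn
    have hget : (arr.set n v).getD (j / 2) 0 = arr.getD (j / 2) 0 := by
      simp only [List.getD, List.getElem?_set]
      rw [if_neg (by omega)]
    by_cases hc : 0 < j ∧ arr.getD (j / 2) 0 < key
    · have hL : sift (arr.set n v) j key
          = (sift (arr.set n v) (j / 2) key).set j (arr.getD (j / 2) 0) := by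
        rw [sift, hget, if_pos hc]
      have hR : sift arr j key = (sift arr (j / 2) key).set j (arr.getD (j / 2) 0) := by
        rw [sift, if_pos hc]
      rw [hL, hR, ih (j / 2) (by omega) arr n v (by omega),
          List.set_comm _ _ (by omega : j ≠ n)]
    · have hL : sift (arr.set n v) j key = (arr.set n v).set j key := by
        rw [sift, hget, if_neg hc]
      have hR : sift arr j key = arr.set j key := by rw [sift, if_neg hc]
      rw [hL, hR, List.set_comm _ _ (by omega : j ≠ n)]

lemma swap_eq_sift (key : Int) :
    ∀ m : Nat, ∀ arr : List Int, m < arr.length →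
      swapLoop (arr.set m key) (m : Int) = sift arr m key := by
  intro m
  induction m using Nat.strong_induction_on with
  | _ m ih =>
    intro arr hm
    by_cases hm0 : m = 0
    · subst hm0
      rw [swapLoop_of_nonpos _ _ (by omega), sift]
      simp
    · have hpos : (0 : Int) < (m : Int) := by omega
      have hfd : PySem.Int.floordiv (m : Int) 2 = ((m / 2 : Nat) : Int) := by
        exact_mod_cast PySem.Int.floordiv_natCast m 2
      have hp : m / 2 < m := by omega
      have hgm : PySem.List.pyGetD (arr.set m key) (m : Int) 0 = key := by
        simp [List.getD, hm]
      have hgp : PySem.List.pyGetD (arr.set m key) ((m / 2 : Nat) : Int) 0 = arr.getD (m / 2) 0 := by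
        rw [PySem.List.pyGetD_natCast]
        simp only [List.getD, List.getElem?_set]
        rw [if_neg (by omega)]
      rw [swapLoop, hfd, hgm, hgp]
      by_cases hc : arr.getD (m / 2) 0 < key
      · have hR : sift arr m key = (sift arr (m / 2) key).set m (arr.getD (m / 2) 0) := by
          rw [sift, if_pos ⟨by omega, hc⟩]
        rw [dif_pos ⟨hpos, hc⟩, PySem.List.pySetD_natCast, PySem.List.pySetD_natCast,
            List.set_set,
            ih (m / 2) hp (arr.set m (arr.getD (m / 2) 0)) (by rw [List.length_set]; omega),
            sift_set_high key (m / 2) arr m (arr.getD (m / 2) 0) hp, hR]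
      · have hR : sift arr m key = arr.set m key := by
          rw [sift, if_neg (by tauto)]
        rw [dif_neg (by tauto), hR]

-- lookup in a dict whose items end with a fresh pair
lemma get?_mk_append_single (es : List (Int × Int)) (k v x : Int) :
    (PySem.Dict.mk (es ++ [(k, v)])).get? x =
      ((PySem.Dict.mk es).get? x).orElse (fun _ => if k == x then some v else none) := by
  induction es with
  | nil =>
    have h0 : (PySem.Dict.mk ([] : List (Int × Int))).get? x = none := rfl
    rw [List.nil_append, PySem.Dict.get?_mk_cons, h0]
    by_cases h : k = x <;> simp [h, Option.orElse]
  | cons p rest ihp =>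
    rw [List.cons_append, PySem.Dict.get?_mk_cons, PySem.Dict.get?_mk_cons, ihp]
    by_cases h : p.1 == x <;> simp [h]

lemma length_rebuild (d : PySem.Dict Int Int) (arr : List Int) :
    (rebuild d arr).length = arr.length := by
  simp [rebuild, PySem.List.length_enumerate]

lemma getElem_rebuild (d : PySem.Dict Int Int) (arr : List Int) (t : Nat) (ht : t < arr.length) :
    (rebuild d arr)[t]'(by rw [length_rebuild]; exact ht) =
      (d.get? (t : Int)).getD (arr[t]'ht) := by
  simp [rebuild, PySem.List.getElem_enumerate]

lemma rebuild_empty (arr : List Int) : rebuild PySem.Dict.empty arr = arr := by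
  apply List.ext_getElem (length_rebuild _ _)
  intro t h1 h2
  rw [getElem_rebuild _ _ _ h2]
  simp [PySem.Dict.get?_empty]

-- appending one fresh override (k, v), k a valid index, is one List.set on the base
lemma rebuild_append_single (es : List (Int × Int)) (arr : List Int) (k : Nat) (v : Int)
    (hk : k < arr.length) :
    rebuild (PySem.Dict.mk (es ++ [(((k : Nat) : Int), v)])) arr =
      rebuild (PySem.Dict.mk es) (arr.set k v) := by
  apply List.ext_getElem (by rw [length_rebuild, length_rebuild, List.length_set])
  intro t h1 h2
  have ht : t < arr.length := by rw [length_rebuild, List.length_set] at h2; exact h2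
  rw [getElem_rebuild _ _ _ ht, getElem_rebuild _ _ _ (by rw [List.length_set]; exact ht),
      get?_mk_append_single]
  rcases h : (PySem.Dict.mk es).get? ((t : Nat) : Int) with _ | w
  · simp only [Option.orElse]
    by_cases hkt : k = t
    · subst hkt
      rw [if_pos (by simp), Option.getD_some, List.getElem_set, if_pos rfl, Option.getD_none]
    · have hbne : (((k : Nat) : Int) == ((t : Nat) : Int)) ≠ true := by
        intro hb; rw [beq_iff_eq] at hb; omega
      rw [if_neg hbne, Option.getD_none, Option.getD_none, List.getElem_set, if_neg hkt]
  · simp [Option.orElse]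

lemma insert_fresh_items (d : PySem.Dict Int Int) (k v : Int) (h : d.contains k = false) :
    d.insert k v = PySem.Dict.mk (d.items ++ [(k, v)]) := by
  apply PySem.Dict.ext
  rw [PySem.Dict.items_insert_of_not_contains _ _ h]

-- writing key at a position the dict does not override commutes with the rebuild
lemma rebuild_set_fresh (d : PySem.Dict Int Int) (arr : List Int) (m : Nat) (key : Int)
    (hm : m < arr.length) (hg : d.get? ((m : Nat) : Int) = none) :
    (rebuild d arr).set m key = rebuild d (arr.set m key) := by
  apply List.ext_getElem (by rw [List.length_set, length_rebuild, length_rebuild, List.length_set])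
  intro t h1 h2
  have ht : t < arr.length := by rw [List.length_set, length_rebuild] at h1; exact h1
  rw [List.getElem_set, getElem_rebuild d (arr.set m key) t (by rw [List.length_set]; exact ht)]
  by_cases htm : m = t
  · subst htm; rw [if_pos rfl, hg]
    simp [List.getElem_set]
  · rw [if_neg htm, getElem_rebuild d arr t ht]
    simp [List.getElem_set, htm]

-- core: applying B's override dict by a full rebuild plus the final key write equals the pure sift
lemma chain_eq (arr : List Int) (key : Int) :
    ∀ m : Nat, ∀ d : PySem.Dict Int Int, m < arr.length →
      (∀ k ∈ d.keys, (m : Int) < k) →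
      PySem.List.pySetD (rebuild (chainLoop arr (m : Int) key d).1 arr)
        (chainLoop arr (m : Int) key d).2 key
        = rebuild d (sift arr m key) := by
  intro m
  induction m using Nat.strong_induction_on with
  | _ m ih =>
    intro d hm hkeys
    have hfd : PySem.Int.floordiv (m : Int) 2 = ((m / 2 : Nat) : Int) := by
      exact_mod_cast PySem.Int.floordiv_natCast m 2
    have hgp : PySem.List.pyGetD arr ((m / 2 : Nat) : Int) 0 = arr.getD (m / 2) 0 :=
      PySem.List.pyGetD_natCast ..
    by_cases hc : 0 < m ∧ arr.getD (m / 2) 0 < key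
    · obtain ⟨hm0, hlt⟩ := hc
      have hp : m / 2 < m := Nat.div_lt_self hm0 (by omega)
      rw [chainLoop, hfd, hgp, dif_pos ⟨by omega, hlt⟩]
      have hfresh : d.contains (m : Int) = false := by
        rw [PySem.Dict.contains_eq_decide_mem_keys]
        simp only [decide_eq_false_iff_not]
        intro hmem
        exact absurd (hkeys _ hmem) (by omega)
      have hkeys' : ∀ k ∈ (d.insert (m : Int) (arr.getD (m / 2) 0)).keys, ((m / 2 : Nat) : Int) < k := by
        intro k hk
        rw [PySem.Dict.mem_keys_insert] at hk
        have hcast : ((m / 2 : Nat) : Int) < (m : Int) := by exact_mod_cast hp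
        rcases hk with rfl | hk
        · exact hcast
        · have := hkeys k hk; omega
      have hR : sift arr m key = (sift arr (m / 2) key).set m (arr.getD (m / 2) 0) := by
        rw [sift, if_pos ⟨hm0, hlt⟩]
      rw [ih (m / 2) hp _ (by omega) hkeys',
          insert_fresh_items _ _ _ hfresh, hR]
      have hmlen : m < (sift arr (m / 2) key).length := by rw [length_sift]; exact hm
      have := rebuild_append_single d.items (sift arr (m / 2) key) m (arr.getD (m / 2) 0) hmlen
      exact this
    · have hred : chainLoop arr (m : Int) key d = (d, (m : Int)) := by
        rw [chainLoop, hfd, hgp, dif_neg (by rintro ⟨h1, h2⟩; exact hc ⟨by omega, h2⟩)]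
      have hR : sift arr m key = arr.set m key := by rw [sift, if_neg hc]
      have hg : d.get? ((m : Nat) : Int) = none := by
        rw [PySem.Dict.get?_eq_none_iff_not_mem_keys]
        exact fun hmem => absurd (hkeys _ hmem) (by omega)
      rw [hred, hR]
      show PySem.List.pySetD (rebuild d arr) ((m : Nat) : Int) key = rebuild d (arr.set m key)
      rw [PySem.List.pySetD_natCast]
      exact rebuild_set_fresh d arr m key hm hg

-- ===== VERDICT (by name: the statement is the Claim_ definition above) =====
theorem increaseKey_spec : Claim_equal_increaseKey := by
  intro arr i key _ hpre
  obtain ⟨hin, hle⟩ := hpre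
  unfold Spec_increaseKey increaseKey increaseKey_alt
  rw [if_neg (by omega), if_neg (by omega)]
  by_cases hneg : i < 0
  · -- negative in-range index: A's loop and B's chain both stop at once
    rw [swapLoop_of_nonpos _ _ (by omega), chainLoop_of_nonpos _ _ _ _ (by omega)]
    show PySem.List.pySetD arr i key = PySem.List.pySetD (rebuild PySem.Dict.empty arr) i key
    rw [rebuild_empty]
  · have hi : i = ((i.toNat : Nat) : Int) := by omega
    have hlen : i.toNat < arr.length := by rcases hin with ⟨_, h2⟩; omega
    rw [hi, PySem.List.pySetD_natCast, swap_eq_sift key i.toNat arr hlen]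
    show sift arr i.toNat key
        = PySem.List.pySetD
            (rebuild (chainLoop arr ((i.toNat : Nat) : Int) key PySem.Dict.empty).1 arr)
            (chainLoop arr ((i.toNat : Nat) : Int) key PySem.Dict.empty).2 key
    rw [chain_eq arr key i.toNat PySem.Dict.empty hlen (by simp [PySem.Dict.keys_empty]),
        rebuild_empty]
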